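-- pv_equiv track=rewrite | github.com/youngwoo-umass/RelevanceThesaurus | src/tlm/data_gen/base.py | concat_triplet_windows
-- ===== SOURCE A (Python) =====
-- from typing import List
--
-- def concat_triplet_windows(triplet_iterator, window_length=None):
--     all_input_ids: List[int] = []
--     all_input_mask: List[int] = []
--     all_segment_ids: List[int] = []
--     for input_ids, input_mask, segment_ids in triplet_iterator:
--         all_input_ids.extend(input_ids)
--         all_input_mask.extend(input_mask)
--         all_segment_ids.extend(segment_ids)
--         if window_length is not None:
--             assert len(input_ids) == window_length
--             assert len(input_mask) == window_length
--             assert len(segment_ids) == window_length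
--
--     return all_input_ids, all_input_mask, all_segment_ids
-- ===== SOURCE B (Python) =====
-- from itertools import chain
--
-- def concat_triplet_windows(triplet_iterator, window_length=None):
--     rows = list(triplet_iterator)
--     if window_length is not None:
--         for input_ids, input_mask, segment_ids in rows:
--             assert len(input_ids) == window_length
--             assert len(input_mask) == window_length
--             assert len(segment_ids) == window_length
--     all_input_ids = list(chain.from_iterable(r[0] for r in rows))
--     all_input_mask = list(chain.from_iterable(r[1] for r in rows))
--     all_segment_ids = list(chain.from_iterable(r[2] for r in rows))
--     return all_input_ids, all_input_mask, all_segment_ids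
-- ===== Notes on version B (the rewrite author's own statement) =====
-- stated objective: alternative
-- what changed: Collect the iterator once, validate window lengths in a separate pass, then build each of the three outputs by column-wise flattening with itertools.chain instead of A's single interleaved extend-loop.
import Mathlib
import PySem

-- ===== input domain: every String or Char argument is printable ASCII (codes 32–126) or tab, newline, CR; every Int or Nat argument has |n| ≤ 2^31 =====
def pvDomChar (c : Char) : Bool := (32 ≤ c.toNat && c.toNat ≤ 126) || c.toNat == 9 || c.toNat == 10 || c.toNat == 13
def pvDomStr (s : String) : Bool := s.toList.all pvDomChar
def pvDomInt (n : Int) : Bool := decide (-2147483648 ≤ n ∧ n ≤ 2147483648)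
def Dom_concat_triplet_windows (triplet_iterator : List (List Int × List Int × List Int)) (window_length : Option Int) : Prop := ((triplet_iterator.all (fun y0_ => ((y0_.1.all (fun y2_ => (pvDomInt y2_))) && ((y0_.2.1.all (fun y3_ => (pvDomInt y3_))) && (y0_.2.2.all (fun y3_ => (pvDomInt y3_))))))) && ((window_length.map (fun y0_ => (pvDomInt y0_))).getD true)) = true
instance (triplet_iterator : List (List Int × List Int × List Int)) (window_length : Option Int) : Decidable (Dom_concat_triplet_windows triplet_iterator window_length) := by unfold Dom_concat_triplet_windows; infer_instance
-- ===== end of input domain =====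

-- B builds the three outputs by column-wise flattening (collect, validate, transpose-flatten)
-- instead of A's single interleaved extend-loop; alternative decomposition, same cost.
-- Where window_length is given and some window has a different length, both Pythons raise
-- AssertionError; Pre_ excludes exactly those inputs.

-- ===== PORT A =====
-- A's loop extends the three accumulators row by row; the per-row asserts are guaranteed
-- to pass by Pre_ (inputs where they fail raise AssertionError and lie outside Pre_).
def concat_triplet_windows (triplet_iterator : List (List Int × List Int × List Int)) (window_length : Option Int) : List Int × List Int × List Int :=
  triplet_iterator.foldl
    (fun acc row => (acc.1 ++ row.1, acc.2.1 ++ row.2.1, acc.2.2 ++ row.2.2))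
    ([], [], [])

-- ===== PORT B =====
-- B's validation pass also only raises outside Pre_; the three column flattenings:
def concat_triplet_windows_alt (triplet_iterator : List (List Int × List Int × List Int)) (window_length : Option Int) : List Int × List Int × List Int :=
  ((triplet_iterator.map (fun r => r.1)).flatten,
   (triplet_iterator.map (fun r => r.2.1)).flatten,
   (triplet_iterator.map (fun r => r.2.2)).flatten)

-- ===== PRECONDITION & SPEC =====
-- Pre_ excludes exactly the inputs on which A raises AssertionError: window_length given
-- and some triplet component's length differs from it.
def Pre_concat_triplet_windows (triplet_iterator : List (List Int × List Int × List Int)) (window_length : Option Int) : Prop :=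
  (match window_length with
   | none => true
   | some w => triplet_iterator.all fun r =>
       ((r.1.length : Int) == w) && ((r.2.1.length : Int) == w) && ((r.2.2.length : Int) == w)) = true
instance (triplet_iterator : List (List Int × List Int × List Int)) (window_length : Option Int) : Decidable (Pre_concat_triplet_windows triplet_iterator window_length) := by unfold Pre_concat_triplet_windows; infer_instance

def pvWitness_concat_triplet_windows : (List (List Int × List Int × List Int)) × Option Int :=
  ([([1, 2], [1, 1], [0, 0]), ([3, 4], [1, 0], [0, 1])], some 2)

def Spec_concat_triplet_windows (triplet_iterator : List (List Int × List Int × List Int)) (window_length : Option Int) (out : List Int × List Int × List Int) : Prop := out = concat_triplet_windows_alt triplet_iterator window_length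
instance (triplet_iterator : List (List Int × List Int × List Int)) (window_length : Option Int) (out : List Int × List Int × List Int) : Decidable (Spec_concat_triplet_windows triplet_iterator window_length out) := by unfold Spec_concat_triplet_windows; infer_instance

-- ===== CLAIM (what is proved, stated in full; the proofs are below) =====
def Claim_equal_concat_triplet_windows : Prop := ∀ (triplet_iterator : List (List Int × List Int × List Int)) (window_length : Option Int), Dom_concat_triplet_windows triplet_iterator window_length → Pre_concat_triplet_windows triplet_iterator window_length → Spec_concat_triplet_windows triplet_iterator window_length (concat_triplet_windows triplet_iterator window_length)

-- ===== LEMMAS AND PROOFS =====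
theorem foldl_extend_eq_flatten (ti : List (List Int × List Int × List Int))
    (a b c : List Int) :
    ti.foldl (fun acc row => (acc.1 ++ row.1, acc.2.1 ++ row.2.1, acc.2.2 ++ row.2.2)) (a, b, c)
      = (a ++ (ti.map (fun r => r.1)).flatten,
         b ++ (ti.map (fun r => r.2.1)).flatten,
         c ++ (ti.map (fun r => r.2.2)).flatten) := by
  induction ti generalizing a b c with
  | nil => simp
  | cons r rs ih => simp [List.foldl_cons, ih]

-- ===== VERDICT (by name: the statement is the Claim_ definition above) =====
theorem concat_triplet_windows_spec : Claim_equal_concat_triplet_windows := by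
  intro ti wl _ _
  unfold Spec_concat_triplet_windows concat_triplet_windows concat_triplet_windows_alt
  simp [foldl_extend_eq_flatten]
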